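-- pv_equiv track=rewrite | github.com/Butlchr17/mini_crossword | crossword.py | normalize_grid
-- ===== SOURCE A (Python) =====
-- def normalize_grid(grid):
--     min_r = min(k[0] for k in grid)
--     max_r = max(k[0] for k in grid)
--     min_c = min(k[1] for k in grid)
--     max_c = max(k[1] for k in grid)
--     rows = max_r - min_r + 1
--     cols = max_c - min_c + 1
--     new_grid = [["." for _ in range(cols)] for _ in range(rows)]
--     for (r, c), letter in grid.items():
--         new_grid[r - min_r][c - min_c] = letter
--     return new_grid, min_r, min_c
-- ===== SOURCE B (Python) =====
-- def normalize_grid(grid):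
--     keys = iter(grid)
--     min_r, min_c = next(keys)
--     max_r, max_c = min_r, min_c
--     for r, c in keys:
--         if r < min_r:
--             min_r = r
--         elif r > max_r:
--             max_r = r
--         if c < min_c:
--             min_c = c
--         elif c > max_c:
--             max_c = c
--     new_grid = [[grid.get((min_r + i, min_c + j), ".")
--                  for j in range(max_c - min_c + 1)]
--                 for i in range(max_r - min_r + 1)]
--     return new_grid, min_r, min_c
-- ===== Notes on version B (the rewrite author's own statement) =====
-- stated objective: alternative
-- what changed: B replaces A's four separate min/max passes with one fold keeping four running bounds, and builds the output grid directly by dictionary lookup per cell instead of allocating a dot-filled table and mutating it per item.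
import Mathlib
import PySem

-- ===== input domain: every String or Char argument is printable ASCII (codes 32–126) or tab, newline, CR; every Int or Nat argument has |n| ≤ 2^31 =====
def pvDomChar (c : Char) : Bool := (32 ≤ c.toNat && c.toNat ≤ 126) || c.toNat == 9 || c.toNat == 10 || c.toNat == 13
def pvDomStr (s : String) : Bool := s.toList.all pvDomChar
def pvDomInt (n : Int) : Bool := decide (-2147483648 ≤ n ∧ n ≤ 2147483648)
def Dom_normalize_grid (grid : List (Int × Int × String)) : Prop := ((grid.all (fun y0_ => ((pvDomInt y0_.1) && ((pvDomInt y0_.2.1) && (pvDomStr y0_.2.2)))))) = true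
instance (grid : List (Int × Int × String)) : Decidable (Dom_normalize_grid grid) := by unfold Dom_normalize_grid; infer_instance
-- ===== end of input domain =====

-- B replaces A's four min/max passes by one running-bounds fold and builds each cell by dict lookup
-- instead of mutating a pre-filled table (objective: alternative decomposition, same value).

-- ===== PORT A =====
-- new_grid[i][j] = letter: row i is replaced by that row with cell j set.
-- The indices r - min_r, c - min_c are always in [0, rows) × [0, cols) (the mins/maxes bound every
-- key), so the Nat conversion is exact (no negative index ever reaches the subscript).
def pvSet2D (g : List (List String)) (i j : Nat) (v : String) : List (List String) :=
  g.set i ((g.getD i []).set j v)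

def normalize_grid (grid : List (Int × Int × String)) : List (List String) × Int × Int :=
  match PySem.List.min? (grid.map (fun k => k.1)) (fun y => y),
        PySem.List.max? (grid.map (fun k => k.1)) (fun y => y),
        PySem.List.min? (grid.map (fun k => k.2.1)) (fun y => y),
        PySem.List.max? (grid.map (fun k => k.2.1)) (fun y => y) with
  | some min_r, some max_r, some min_c, some max_c =>
    let rows := max_r - min_r + 1
    let cols := max_c - min_c + 1
    let new_grid : List (List String) :=
      (PySem.List.pyRange 0 rows 1).map (fun _ => (PySem.List.pyRange 0 cols 1).map (fun _ => "."))
    let new_grid :=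
      grid.foldl (fun g p => pvSet2D g (p.1 - min_r).toNat (p.2.1 - min_c).toNat p.2.2) new_grid
    (new_grid, min_r, min_c)
  | _, _, _, _ => ([], 0, 0)   -- unreachable under Pre_ (empty grid: Python raises ValueError)

-- ===== PORT B =====
-- one if/elif bounds update per coordinate, exactly B's loop body
def pvStep (b : Int × Int × Int × Int) (p : Int × Int × String) : Int × Int × Int × Int :=
  let rb := if p.1 < b.1 then (p.1, b.2.1) else if b.2.1 < p.1 then (b.1, p.1) else (b.1, b.2.1)
  let cb := if p.2.1 < b.2.2.1 then (p.2.1, b.2.2.2)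
            else if b.2.2.2 < p.2.1 then (b.2.2.1, p.2.1) else (b.2.2.1, b.2.2.2)
  (rb.1, rb.2, cb.1, cb.2)

-- grid.get((…), ".") looks the key up in the dict the argument denotes: Dict.ofList of the items.
def normalize_grid_alt (grid : List (Int × Int × String)) : List (List String) × Int × Int :=
  match grid with
  | [] => ([], 0, 0)          -- Python B raises StopIteration here; outside Pre_
  | (r0, c0, _) :: rest =>
    let b := rest.foldl pvStep (r0, r0, c0, c0)
    let d : PySem.Dict (Int × Int) String :=
      PySem.Dict.ofList (grid.map (fun p => ((p.1, p.2.1), p.2.2)))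
    ((PySem.List.pyRange 0 (b.2.1 - b.1 + 1) 1).map (fun i =>
        (PySem.List.pyRange 0 (b.2.2.2 - b.2.2.1 + 1) 1).map (fun j =>
          d.getD (b.1 + i, b.2.2.1 + j) ".")),
     b.1, b.2.2.1)

-- ===== PRECONDITION & SPEC =====
-- Pre_ excludes only the empty dict, on which A raises ValueError (min() of an empty sequence).
def Pre_normalize_grid (grid : List (Int × Int × String)) : Prop := grid ≠ []
instance (grid : List (Int × Int × String)) : Decidable (Pre_normalize_grid grid) := by
  unfold Pre_normalize_grid; infer_instance
def pvWitness_normalize_grid : (List (Int × Int × String)) := [(0, 0, "a"), (1, 2, "b")]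

def Spec_normalize_grid (grid : List (Int × Int × String)) (out : List (List String) × Int × Int) : Prop := out = normalize_grid_alt grid
instance (grid : List (Int × Int × String)) (out : List (List String) × Int × Int) : Decidable (Spec_normalize_grid grid out) := by unfold Spec_normalize_grid; infer_instance

-- ===== CLAIM (what is proved, stated in full; the proofs are below) =====
def Claim_equal_normalize_grid : Prop := ∀ (grid : List (Int × Int × String)), Dom_normalize_grid grid → Pre_normalize_grid grid → Spec_normalize_grid grid (normalize_grid grid)

-- ===== LEMMAS AND PROOFS =====

-- one coordinate's if/elif chain, for reasoning about pvStep
def pvUpd (b : Int × Int) (a : Int) : Int × Int :=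
  if a < b.1 then (a, b.2) else if b.2 < a then (b.1, a) else b

-- B's if/elif pair-fold computes (running min, running max), given min ≤ max.
lemma pvUpd_fold (l : List Int) (m x : Int) (h : m ≤ x) :
    l.foldl pvUpd (m, x) = (l.foldl min m, l.foldl max x) := by
  induction l generalizing m x with
  | nil => rfl
  | cons a t ih =>
    simp only [List.foldl_cons, pvUpd]
    split_ifs with h1 h2
    · have hm : min m a = a := by omega
      have hx : max x a = x := by omega
      rw [hm, hx]; exact ih a x (by omega)
    · have hm : min m a = m := by omega
      have hx : max x a = a := by omega
      rw [hm, hx]; exact ih m a (by omega)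
    · have hm : min m a = m := by omega
      have hx : max x a = x := by omega
      rw [hm, hx]; exact ih m x h

lemma pvStep_eq (b : Int × Int × Int × Int) (p : Int × Int × String) :
    pvStep b p = ((pvUpd (b.1, b.2.1) p.1).1, (pvUpd (b.1, b.2.1) p.1).2,
                  (pvUpd (b.2.2.1, b.2.2.2) p.2.1).1, (pvUpd (b.2.2.1, b.2.2.2) p.2.1).2) := rfl

-- the 4-tuple fold splits into two independent pair folds
lemma pvStep_fold (l : List (Int × Int × String)) (mr xr mc xc : Int) :
    l.foldl pvStep (mr, xr, mc, xc) =
      (((l.map (fun p => p.1)).foldl pvUpd (mr, xr)).1,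
       ((l.map (fun p => p.1)).foldl pvUpd (mr, xr)).2,
       ((l.map (fun p => p.2.1)).foldl pvUpd (mc, xc)).1,
       ((l.map (fun p => p.2.1)).foldl pvUpd (mc, xc)).2) := by
  induction l generalizing mr xr mc xc with
  | nil => rfl
  | cons a t ih =>
    simp only [List.foldl_cons, List.map_cons, pvStep_eq]
    exact ih _ _ _ _

lemma pvGetD_set {α : Type} (l : List α) (i j : Nat) (a d : α) :
    (l.set i a).getD j d = if i = j ∧ j < l.length then a else l.getD j d := by
  rcases Nat.lt_or_ge j l.length with hj | hj
  · rw [List.getD_eq_getElem l d hj, List.getD_eq_getElem _ d (by simpa using hj)]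
    rw [List.getElem_set]
    split_ifs with h1 h2 h3 <;> first | rfl | omega
  · rw [List.getD_eq_default _ _ (by simpa using hj), List.getD_eq_default _ _ hj]
    split_ifs with h1
    · omega
    · rfl

-- main invariant: A's fill loop and B's dict, advanced together over the same items
lemma pvFill (minr minc : Int) (rowsN colsN : Nat)
    (l : List (Int × Int × String)) (g : List (List String)) (d : PySem.Dict (Int × Int) String)
    (hb : ∀ p ∈ l, minr ≤ p.1 ∧ p.1 < minr + rowsN ∧ minc ≤ p.2.1 ∧ p.2.1 < minc + colsN)
    (hlen : g.length = rowsN)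
    (hrow : ∀ i : Nat, i < rowsN → (g.getD i []).length = colsN)
    (hpt : ∀ i j : Nat, i < rowsN → j < colsN →
      (g.getD i []).getD j "." = d.getD (minr + i, minc + j) ".") :
    (l.foldl (fun g p => pvSet2D g (p.1 - minr).toNat (p.2.1 - minc).toNat p.2.2) g).length = rowsN ∧
    (∀ i : Nat, i < rowsN →
      ((l.foldl (fun g p => pvSet2D g (p.1 - minr).toNat (p.2.1 - minc).toNat p.2.2) g).getD i []).length = colsN) ∧
    (∀ i j : Nat, i < rowsN → j < colsN →
      ((l.foldl (fun g p => pvSet2D g (p.1 - minr).toNat (p.2.1 - minc).toNat p.2.2) g).getD i []).getD j "."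
        = (l.foldl (fun d p => d.insert (p.1, p.2.1) p.2.2) d).getD (minr + i, minc + j) ".") := by
  induction l generalizing g d with
  | nil => exact ⟨hlen, hrow, hpt⟩
  | cons p t ih =>
    obtain ⟨h1, h2, h3, h4⟩ := hb p (by simp)
    have hipr : (p.1 - minr).toNat < rowsN := by omega
    have hjpc : (p.2.1 - minc).toNat < colsN := by omega
    simp only [List.foldl_cons]
    apply ih _ _ (fun q hq => hb q (by simp [hq]))
    · simp [pvSet2D, hlen]
    · intro i hi
      simp only [pvSet2D]
      rw [pvGetD_set]
      split_ifs with h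
      · rw [List.length_set]; exact hrow _ hipr
      · exact hrow i hi
    · intro i j hi hj
      simp only [pvSet2D]
      rw [pvGetD_set, PySem.Dict.getD_insert]
      by_cases hkey : (minr + (i : Int), minc + (j : Int)) = (p.1, p.2.1)
      · have hieq : i = (p.1 - minr).toNat := by
          have := congrArg Prod.fst hkey; simp only at this; omega
        have hjeq : j = (p.2.1 - minc).toNat := by
          have := congrArg Prod.snd hkey; simp only at this; omega
        rw [if_pos hkey, if_pos ⟨hieq.symm, by omega⟩, pvGetD_set,
            if_pos ⟨hjeq.symm, by rw [hrow _ hipr]; exact hj⟩]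
      · rw [if_neg hkey]
        split_ifs with h
        · -- cell in the same row: the column must differ, else the keys were equal
          have hjne : (p.2.1 - minc).toNat ≠ j := by
            intro hc
            apply hkey
            have hie := h.1
            simp only [Prod.mk.injEq] at hkey ⊢
            constructor <;> omega
          rw [pvGetD_set, if_neg (by intro hc; exact hjne hc.1), h.1]
          exact hpt i j hi hj
        · exact hpt i j hi hj

-- list extensionality through getD
lemma pvEqByGetD {α : Type} (d : α) (l1 l2 : List α)
    (hlen : l1.length = l2.length)
    (h : ∀ i : Nat, i < l1.length → l1.getD i d = l2.getD i d) : l1 = l2 := by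
  apply List.ext_getElem hlen
  intro i h1 h2
  have := h i h1
  rwa [List.getD_eq_getElem _ d h1, List.getD_eq_getElem _ d h2] at this

lemma pvFoldlMin_le (t : List Int) (a : Int) :
    t.foldl min a ≤ a ∧ ∀ y ∈ t, t.foldl min a ≤ y := by
  have h := PySem.List.min?_id_cons a t
  have hmem := PySem.List.min?_isMin h
  constructor
  · exact hmem a (by simp)
  · intro y hy; exact hmem y (by simp [hy])

lemma pvFoldlMax_ge (t : List Int) (a : Int) :
    a ≤ t.foldl max a ∧ ∀ y ∈ t, y ≤ t.foldl max a := by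
  have h := PySem.List.max?_id_cons a t
  have hmem := PySem.List.max?_isMax h
  constructor
  · exact hmem a (by simp)
  · intro y hy; exact hmem y (by simp [hy])

-- ===== VERDICT (by name: the statement is the Claim_ definition above) =====
theorem normalize_grid_spec : Claim_equal_normalize_grid := by
  intro grid _ hpre
  unfold Spec_normalize_grid
  match grid with
  | [] => exact absurd rfl hpre
  | (r0, c0, s0) :: rest =>
    clear hpre
    -- names for the coordinate lists
    set rs := rest.map (fun p : Int × Int × String => p.1) with hrs
    set cs := rest.map (fun p : Int × Int × String => p.2.1) with hcs
    set minr := rs.foldl min r0 with hminr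
    set maxr := rs.foldl max r0 with hmaxr
    set minc := cs.foldl min c0 with hminc
    set maxc := cs.foldl max c0 with hmaxc
    -- A's four extrema
    have hminA : PySem.List.min? (((r0, c0, s0) :: rest).map (fun k => k.1)) (fun y => y) = some minr := by
      simp only [List.map_cons]; rw [PySem.List.min?_id_cons]
    have hmaxA : PySem.List.max? (((r0, c0, s0) :: rest).map (fun k => k.1)) (fun y => y) = some maxr := by
      simp only [List.map_cons]; rw [PySem.List.max?_id_cons]
    have hminA' : PySem.List.min? (((r0, c0, s0) :: rest).map (fun k => k.2.1)) (fun y => y) = some minc := by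
      simp only [List.map_cons]; rw [PySem.List.min?_id_cons]
    have hmaxA' : PySem.List.max? (((r0, c0, s0) :: rest).map (fun k => k.2.1)) (fun y => y) = some maxc := by
      simp only [List.map_cons]; rw [PySem.List.max?_id_cons]
    -- B's bounds fold computes the same four numbers
    have hB : rest.foldl pvStep (r0, r0, c0, c0) = (minr, maxr, minc, maxc) := by
      rw [pvStep_fold, pvUpd_fold rs r0 r0 le_rfl, pvUpd_fold cs c0 c0 le_rfl]
    -- order facts
    have hmr := pvFoldlMin_le rs r0
    have hxr := pvFoldlMax_ge rs r0
    have hmc := pvFoldlMin_le cs c0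
    have hxc := pvFoldlMax_ge cs c0
    have hrle : minr ≤ maxr := le_trans hmr.1 hxr.1
    have hcle : minc ≤ maxc := le_trans hmc.1 hxc.1
    set rowsN := (maxr - minr + 1).toNat with hrowsN
    set colsN := (maxc - minc + 1).toNat with hcolsN
    -- every key is inside the bounding box
    have hbounds : ∀ p ∈ (r0, c0, s0) :: rest,
        minr ≤ p.1 ∧ p.1 < minr + rowsN ∧ minc ≤ p.2.1 ∧ p.2.1 < minc + colsN := by
      intro p hp
      have hr1 : minr ≤ p.1 ∧ p.1 ≤ maxr := by
        rcases List.mem_cons.mp hp with h | h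
        · subst h; exact ⟨hmr.1, hxr.1⟩
        · exact ⟨hmr.2 p.1 (List.mem_map.mpr ⟨p, h, rfl⟩), hxr.2 p.1 (List.mem_map.mpr ⟨p, h, rfl⟩)⟩
      have hc1 : minc ≤ p.2.1 ∧ p.2.1 ≤ maxc := by
        rcases List.mem_cons.mp hp with h | h
        · subst h; exact ⟨hmc.1, hxc.1⟩
        · exact ⟨hmc.2 p.2.1 (List.mem_map.mpr ⟨p, h, rfl⟩), hxc.2 p.2.1 (List.mem_map.mpr ⟨p, h, rfl⟩)⟩
      refine ⟨hr1.1, by omega, hc1.1, by omega⟩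
    -- A's initial table is rowsN × colsN dots
    have hT0 : ((PySem.List.pyRange 0 (maxr - minr + 1) 1).map
          (fun _ => (PySem.List.pyRange 0 (maxc - minc + 1) 1).map (fun _ => ("." : String))))
        = List.replicate rowsN (List.replicate colsN ".") := by
      rw [List.map_const', List.map_const', PySem.List.length_pyRange_one,
          PySem.List.length_pyRange_one]
      simp [hrowsN, hcolsN]
    -- run the invariant from the blank table / empty dict
    have hfill := pvFill minr minc rowsN colsN ((r0, c0, s0) :: rest)
      (List.replicate rowsN (List.replicate colsN ".")) PySem.Dict.empty
      hbounds (by simp)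
      (by intro i hi
          rw [List.getD_eq_getElem _ _ (by simpa using hi), List.getElem_replicate]
          simp)
      (by intro i j hi hj
          have hrowi : (List.replicate rowsN (List.replicate colsN ("." : String))).getD i []
              = List.replicate colsN "." := by
            rw [List.getD_eq_getElem _ _ (by simpa using hi)]
            exact List.getElem_replicate ..
          rw [hrowi, List.getD_eq_getElem _ _ (by simpa using hj), List.getElem_replicate]
          simp [PySem.Dict.getD_empty])
    obtain ⟨hFlen, hFrow, hFpt⟩ := hfill
    -- unfold both ports
    show normalize_grid ((r0, c0, s0) :: rest) = normalize_grid_alt ((r0, c0, s0) :: rest)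
    rw [normalize_grid, normalize_grid_alt]
    rw [hminA, hmaxA, hminA', hmaxA', hB]
    simp only
    refine Prod.ext ?_ rfl
    show (((r0, c0, s0) :: rest).foldl
        (fun g p => pvSet2D g (p.1 - minr).toNat (p.2.1 - minc).toNat p.2.2)
        ((PySem.List.pyRange 0 (maxr - minr + 1) 1).map
          (fun _ => (PySem.List.pyRange 0 (maxc - minc + 1) 1).map (fun _ => ".")))) =
      (PySem.List.pyRange 0 (maxr - minr + 1) 1).map (fun i =>
        (PySem.List.pyRange 0 (maxc - minc + 1) 1).map (fun j =>
          (PySem.Dict.ofList (((r0, c0, s0) :: rest).map (fun p => ((p.1, p.2.1), p.2.2)))).getD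
            (minr + i, minc + j) "."))
    rw [hT0]
    -- B's dict is the same foldl-insert as the invariant's
    have hdict : PySem.Dict.ofList (((r0, c0, s0) :: rest).map (fun p => ((p.1, p.2.1), p.2.2)))
        = ((r0, c0, s0) :: rest).foldl (fun d p => d.insert (p.1, p.2.1) p.2.2) PySem.Dict.empty := by
      show PySem.Dict.empty.update _ = _
      unfold PySem.Dict.update
      rw [List.foldl_map]
    rw [hdict]
    -- compare the two tables cell by cell
    apply pvEqByGetD ([] : List String)
    · rw [hFlen, List.length_map, PySem.List.length_pyRange_one]
      simp [hrowsN]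
    · intro i hi
      have hi' : i < rowsN := by rw [hFlen] at hi; exact hi
      have hilen : i < ((PySem.List.pyRange 0 (maxr - minr + 1) 1).map (fun i =>
          (PySem.List.pyRange 0 (maxc - minc + 1) 1).map (fun j =>
            (((r0, c0, s0) :: rest).foldl (fun d p => d.insert (p.1, p.2.1) p.2.2)
              PySem.Dict.empty).getD (minr + i, minc + j) "."))).length := by
        rw [List.length_map, PySem.List.length_pyRange_one]; simpa [hrowsN] using hi'
      rw [List.getD_eq_getElem _ _ hilen, List.getElem_map]
      have hri : (PySem.List.pyRange 0 (maxr - minr + 1) 1)[i]'(by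
          rw [PySem.List.length_pyRange_one]; simpa [hrowsN] using hi') = (i : Int) := by
        rw [PySem.List.getElem_pyRange_one]; omega
      rw [hri]
      apply pvEqByGetD ("." : String)
      · rw [hFrow i hi', List.length_map, PySem.List.length_pyRange_one]
        simp [hcolsN]
      · intro j hj
        have hj' : j < colsN := by rw [hFrow i hi'] at hj; exact hj
        have hjlen : j < ((PySem.List.pyRange 0 (maxc - minc + 1) 1).map (fun jj =>
            (((r0, c0, s0) :: rest).foldl (fun d p => d.insert (p.1, p.2.1) p.2.2)
              PySem.Dict.empty).getD (minr + (i : Int), minc + jj) ".")).length := by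
          rw [List.length_map, PySem.List.length_pyRange_one]; simpa [hcolsN] using hj'
        rw [List.getD_eq_getElem _ _ hjlen, List.getElem_map]
        have hcj : (PySem.List.pyRange 0 (maxc - minc + 1) 1)[j]'(by
            rw [PySem.List.length_pyRange_one]; simpa [hcolsN] using hj') = (j : Int) := by
          rw [PySem.List.getElem_pyRange_one]; omega
        rw [hcj]
        exact hFpt i j hi' hj'
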